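-- pv_equiv track=rewrite | github.com/DuckDuckStudio/Fufu_Dev_Tools | src/git/git连续尝试.py | is_network_error
-- ===== SOURCE A (Python) =====
-- def is_network_error(stderr): # 判断错误类型
--     network_error_keywords = [
--         "unable to access",
--         "Could not resolve host",
--         "Failed to connect",
--         "Operation timed out",
--         "early EOF",
--         "RPC failed"
--     ]
--     for keyword in network_error_keywords:
--         if keyword in stderr:
--             return True
--     return False
-- ===== SOURCE B (Python) =====
-- def is_network_error(stderr):  # position-driven single scan instead of per-keyword substring searches
--     network_error_keywords = [
--         "unable to access",
--         "Could not resolve host",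
--         "Failed to connect",
--         "Operation timed out",
--         "early EOF",
--         "RPC failed"
--     ]
--     return any(stderr.startswith(keyword, i)
--                for i in range(len(stderr) + 1)
--                for keyword in network_error_keywords)
-- ===== Notes on version B (the rewrite author's own statement) =====
-- stated objective: alternative
-- what changed: A scans the whole string once per keyword using substring containment; B makes one left-to-right scan over the positions of stderr and at each position checks whether any keyword starts there (startswith with an offset), like an alternation automaton would.
import Mathlib
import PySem

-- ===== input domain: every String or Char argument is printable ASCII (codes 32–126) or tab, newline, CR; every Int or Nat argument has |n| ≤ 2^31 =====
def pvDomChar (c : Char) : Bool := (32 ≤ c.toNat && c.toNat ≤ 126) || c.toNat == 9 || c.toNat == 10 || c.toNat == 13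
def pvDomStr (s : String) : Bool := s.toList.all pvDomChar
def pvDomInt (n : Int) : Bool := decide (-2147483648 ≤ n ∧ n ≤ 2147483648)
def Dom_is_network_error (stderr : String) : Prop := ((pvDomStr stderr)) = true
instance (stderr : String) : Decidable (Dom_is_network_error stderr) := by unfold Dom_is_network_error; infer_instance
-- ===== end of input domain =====

-- B replaces A's per-keyword 'in' scans by one scan over positions, checking at each
-- position whether any keyword starts there (objective: alternative; return value only).


-- ===== PORT A =====
def netKeywordsA : List String :=
  ["unable to access", "Could not resolve host", "Failed to connect",
   "Operation timed out", "early EOF", "RPC failed"]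

-- A's for-loop with early return: try each keyword with 'in', return True on the first hit
def netLoopA : List String → String → Bool
  | [], _ => false
  | k :: ks, s => if PySem.Str.isIn k s then true else netLoopA ks s

def is_network_error (stderr : String) : Bool :=
  netLoopA netKeywordsA stderr

-- ===== PORT B =====
def netKeywordsB : List String :=
  ["unable to access", "Could not resolve host", "Failed to connect",
   "Operation timed out", "early EOF", "RPC failed"]

-- any(stderr.startswith(keyword, i) for i in range(len(stderr)+1) for keyword in keywords);
-- stderr.startswith(k, i) with 0 ≤ i ≤ len(stderr) is exactly: k's chars are a prefix of the chars from i on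
def is_network_error_alt (stderr : String) : Bool :=
  let cs := stderr.toList
  (List.range (cs.length + 1)).any fun i =>
    netKeywordsB.any fun k => k.toList.isPrefixOf (cs.drop i)

-- ===== PRECONDITION & SPEC =====
def Spec_is_network_error (stderr : String) (out : Bool) : Prop := out = is_network_error_alt stderr
instance (stderr : String) (out : Bool) : Decidable (Spec_is_network_error stderr out) := by unfold Spec_is_network_error; infer_instance

-- ===== CLAIM (what is proved, stated in full; the proofs are below) =====
def Claim_equal_is_network_error : Prop := ∀ (stderr : String), Dom_is_network_error stderr → Spec_is_network_error stderr (is_network_error stderr)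

-- ===== LEMMAS AND PROOFS =====

lemma netKeywordsB_eq : netKeywordsB = netKeywordsA := rfl

lemma netLoopA_eq_any (ks : List String) (s : String) :
    netLoopA ks s = ks.any fun k => PySem.Str.isIn k s := by
  induction ks with
  | nil => rfl
  | cons k ks ih =>
      simp only [netLoopA, List.any_cons]
      by_cases h : PySem.Str.isIn k s <;> simp [ih]

lemma infix_iff_prefix_drop (l₁ l₂ : List Char) :
    l₁ <:+: l₂ ↔ ∃ i, i ≤ l₂.length ∧ l₁ <+: l₂.drop i := by
  constructor
  · rintro ⟨u, v, rfl⟩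
    exact ⟨u.length, by simp, by simp⟩
  · rintro ⟨i, _, hp⟩
    exact hp.isInfix.trans (l₂.drop_suffix i).isInfix

-- ===== VERDICT (by name: the statement is the Claim_ definition above) =====
theorem is_network_error_spec : Claim_equal_is_network_error := by
  intro s _
  unfold Spec_is_network_error
  rw [Bool.eq_iff_iff]
  simp only [is_network_error, is_network_error_alt, netLoopA_eq_any, netKeywordsB_eq,
    List.any_eq_true, PySem.Str.isIn_iff_infix, List.isPrefixOf_iff_prefix, List.mem_range]
  constructor
  · rintro ⟨k, hk, hinf⟩
    rcases (infix_iff_prefix_drop _ _).1 hinf with ⟨i, hi, hp⟩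
    exact ⟨i, by omega, k, hk, hp⟩
  · rintro ⟨i, hi, k, hk, hp⟩
    exact ⟨k, hk, (infix_iff_prefix_drop _ _).2 ⟨i, by omega, hp⟩⟩
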